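-- pv_equiv track=rewrite | github.com/ZeyadWaleed7/AI-Testdoc-Agent | ai_agent/watcher.py | _parse_diff_chunk
-- ===== SOURCE A (Python) =====
-- from typing import Dict, List, Tuple, Optional, Any
--
-- def _parse_diff_chunk(chunk: str) -> Tuple[str, List[Tuple[int, str]], List[Tuple[int, str]]]:
--     lines = chunk.split('\n')
--     file_path = ""
--     added_lines = []
--     removed_lines = []
--
--     for line in lines:
--         if line.startswith('+++ b/'):
--             file_path = line[6:]
--         elif line.startswith('+') and not line.startswith('+++'):
--             line_num = len(added_lines) + 1
--             added_lines.append((line_num, line[1:]))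
--         elif line.startswith('-') and not line.startswith('---'):
--             line_num = len(removed_lines) + 1
--             removed_lines.append((line_num, line[1:]))
--
--     return file_path, added_lines, removed_lines
-- ===== SOURCE B (Python) =====
-- def _parse_diff_chunk(chunk):
--     lines = chunk.split('\n')
--     added_lines = [(i + 1, l[1:]) for i, l in
--                    enumerate(l for l in lines if l.startswith('+') and not l.startswith('+++'))]
--     removed_lines = [(i + 1, l[1:]) for i, l in
--                      enumerate(l for l in lines if l.startswith('-') and not l.startswith('---'))]
--     file_path = ""
--     for line in reversed(lines):
--         if line.startswith('+++ b/'):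
--             file_path = line[6:]
--             break
--     return file_path, added_lines, removed_lines
-- ===== Notes on version B (the rewrite author's own statement) =====
-- stated objective: simpler
-- what changed: Replaces the single interleaved accumulator loop by three independent passes: a filter-then-enumerate comprehension for added lines, one for removed lines, and a reverse scan with early break for the last '+++ b/' header.
import Mathlib
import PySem

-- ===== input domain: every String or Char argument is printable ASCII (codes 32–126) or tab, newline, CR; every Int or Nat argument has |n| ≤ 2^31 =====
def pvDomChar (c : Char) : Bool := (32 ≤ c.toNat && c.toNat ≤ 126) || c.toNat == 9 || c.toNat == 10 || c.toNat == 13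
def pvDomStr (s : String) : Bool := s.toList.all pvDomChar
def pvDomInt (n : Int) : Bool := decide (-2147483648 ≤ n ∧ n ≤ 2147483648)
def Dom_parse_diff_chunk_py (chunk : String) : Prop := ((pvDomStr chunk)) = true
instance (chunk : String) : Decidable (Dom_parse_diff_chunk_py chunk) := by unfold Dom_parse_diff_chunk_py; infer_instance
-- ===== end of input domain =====

-- B replaces A's single interleaved accumulator loop by three independent passes
-- (filter-then-enumerate for added and removed lines, reverse scan with break for
-- the file path); objective: simpler decomposition, same O(n) cost.

-- ===== PORT A =====
-- one step of A's for-loop over the split lines, state = (file_path, added, removed)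
def pvStepA (s : String × (List (Int × String)) × (List (Int × String))) (line : String) :
    String × (List (Int × String)) × (List (Int × String)) :=
  match s with
  | (fp, ad, rm) =>
    if PySem.Str.startswith line "+++ b/" then
      (PySem.Str.slice line (some 6) none, ad, rm)
    else if PySem.Str.startswith line "+" && !(PySem.Str.startswith line "+++") then
      (fp, ad ++ [(((ad.length : Int) + 1), PySem.Str.slice line (some 1) none)], rm)
    else if PySem.Str.startswith line "-" && !(PySem.Str.startswith line "---") then
      (fp, ad, rm ++ [(((rm.length : Int) + 1), PySem.Str.slice line (some 1) none)])
    else (fp, ad, rm)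

def parse_diff_chunk_py (chunk : String) : String × (List (Int × String)) × (List (Int × String)) :=
  (((PySem.Str.split? chunk "\n").getD [])).foldl pvStepA ("", [], [])

-- ===== PORT B =====
-- B's 'for line in reversed(lines): if …: file_path = line[6:]; break' loop
def pvLastBPath : List String → String
  | [] => ""
  | l :: rest =>
    if PySem.Str.startswith l "+++ b/" then PySem.Str.slice l (some 6) none
    else pvLastBPath rest

def parse_diff_chunk_py_alt (chunk : String) : String × (List (Int × String)) × (List (Int × String)) :=
  let lines := ((PySem.Str.split? chunk "\n").getD [])
  let added := (PySem.List.enumerate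
      (lines.filter (fun l => PySem.Str.startswith l "+" && !(PySem.Str.startswith l "+++"))) 0).map
      (fun p => (p.1 + 1, PySem.Str.slice p.2 (some 1) none))
  let removed := (PySem.List.enumerate
      (lines.filter (fun l => PySem.Str.startswith l "-" && !(PySem.Str.startswith l "---"))) 0).map
      (fun p => (p.1 + 1, PySem.Str.slice p.2 (some 1) none))
  (pvLastBPath lines.reverse, added, removed)

-- ===== PRECONDITION & SPEC =====
def Spec_parse_diff_chunk_py (chunk : String) (out : String × (List (Int × String)) × (List (Int × String))) : Prop := out = parse_diff_chunk_py_alt chunk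
instance (chunk : String) (out : String × (List (Int × String)) × (List (Int × String))) : Decidable (Spec_parse_diff_chunk_py chunk out) := by unfold Spec_parse_diff_chunk_py; infer_instance

-- ===== CLAIM (what is proved, stated in full; the proofs are below) =====
def Claim_equal_parse_diff_chunk_py : Prop := ∀ (chunk : String), Dom_parse_diff_chunk_py chunk → Spec_parse_diff_chunk_py chunk (parse_diff_chunk_py chunk)

-- ===== LEMMAS AND PROOFS =====

-- the last '+++ b/' match in `lines`, with default `fp` (A's running file_path)
def pvLastPath (fp : String) : List String → String
  | [] => fp
  | l :: rest =>
    pvLastPath (if PySem.Str.startswith l "+++ b/" then PySem.Str.slice l (some 6) none else fp) rest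

-- added lines of `lines` numbered from n+1 (A's numbering with n items already collected)
def pvAddFrom (n : Int) : List String → List (Int × String)
  | [] => []
  | l :: rest =>
    if PySem.Str.startswith l "+++ b/" then pvAddFrom n rest
    else if PySem.Str.startswith l "+" && !(PySem.Str.startswith l "+++") then
      (n + 1, PySem.Str.slice l (some 1) none) :: pvAddFrom (n + 1) rest
    else pvAddFrom n rest

def pvRemFrom (n : Int) : List String → List (Int × String)
  | [] => []
  | l :: rest =>
    if PySem.Str.startswith l "+++ b/" then pvRemFrom n rest
    else if PySem.Str.startswith l "+" && !(PySem.Str.startswith l "+++") then pvRemFrom n rest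
    else if PySem.Str.startswith l "-" && !(PySem.Str.startswith l "---") then
      (n + 1, PySem.Str.slice l (some 1) none) :: pvRemFrom (n + 1) rest
    else pvRemFrom n rest

lemma pvB_plus3 (cs : List Char) (h : PySem.Chars.startswith cs ['+','+','+',' ','b','/'] = true) :
    PySem.Chars.startswith cs ['+','+','+'] = true := by
  rw [PySem.Chars.startswith_iff] at *
  exact List.IsPrefix.trans (by decide) h

lemma pvB_plus (cs : List Char) (h : PySem.Chars.startswith cs ['+','+','+',' ','b','/'] = true) :
    PySem.Chars.startswith cs ['+'] = true := by
  rw [PySem.Chars.startswith_iff] at *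
  exact List.IsPrefix.trans (by decide) h

lemma pv_plus_not_minus (cs : List Char) (h : PySem.Chars.startswith cs ['+'] = true) :
    PySem.Chars.startswith cs ['-'] = false := by
  rw [PySem.Chars.startswith_iff] at h
  rw [Bool.eq_false_iff]
  intro hm
  rw [PySem.Chars.startswith_iff] at hm
  rcases h with ⟨t, ht⟩
  rcases hm with ⟨t2, ht2⟩
  rw [← ht] at ht2
  simp at ht2

-- A's fold from an arbitrary state, characterised by the three helpers
lemma pvFoldA (lines : List String) : ∀ (fp : String) (ad rm : List (Int × String)),
    lines.foldl pvStepA (fp, ad, rm) =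
      (pvLastPath fp lines, ad ++ pvAddFrom (ad.length : Int) lines,
        rm ++ pvRemFrom (rm.length : Int) lines) := by
  induction lines with
  | nil => intro fp ad rm; simp [pvLastPath, pvAddFrom, pvRemFrom]
  | cons l rest ih =>
    intro fp ad rm
    simp only [List.foldl_cons, pvStepA]
    split_ifs with h1 h2 h3
    · rw [ih]; simp_all [pvLastPath, pvAddFrom, pvRemFrom]
    · rw [ih]; simp_all [pvLastPath, pvAddFrom, pvRemFrom]
    · rw [ih]; simp_all [pvLastPath, pvAddFrom, pvRemFrom]
    · rw [ih]; simp_all [pvLastPath, pvAddFrom, pvRemFrom]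

-- pvLastBPath over an append: the first match in the left part wins
lemma pvLastBPath_append (xs ys : List String) :
    pvLastBPath (xs ++ ys) =
      (if xs.any (fun l => PySem.Str.startswith l "+++ b/") then pvLastBPath xs
       else pvLastBPath ys) := by
  induction xs with
  | nil => simp [pvLastBPath]
  | cons x xs ih =>
    simp only [List.cons_append, pvLastBPath, List.any_cons]
    by_cases h : PySem.Str.startswith x "+++ b/" = true <;> simp_all

-- A's last-match scan equals B's reversed first-match scan
lemma pvLastPath_eq (lines : List String) : ∀ fp : String,
    pvLastPath fp lines =
      (if lines.any (fun l => PySem.Str.startswith l "+++ b/") then pvLastBPath lines.reverse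
       else fp) := by
  induction lines with
  | nil => intro fp; simp [pvLastPath]
  | cons l rest ih =>
    intro fp
    simp only [pvLastPath, ih, List.any_cons, List.reverse_cons, pvLastBPath_append,
      List.any_reverse]
    by_cases h2 : ∃ x ∈ rest, PySem.Chars.startswith x.toList ['+','+','+',' ','b','/'] = true
    · simp_all
    · by_cases h1 : PySem.Chars.startswith l.toList ['+','+','+',' ','b','/'] = true <;>
        simp_all [pvLastBPath]

-- A's added-line numbering equals B's filter-then-enumerate pass
lemma pvAddFrom_eq (lines : List String) : ∀ n : Int,
    pvAddFrom n lines =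
      (PySem.List.enumerate
        (lines.filter (fun l => PySem.Str.startswith l "+" && !(PySem.Str.startswith l "+++"))) n).map
        (fun p => (p.1 + 1, PySem.Str.slice p.2 (some 1) none)) := by
  induction lines with
  | nil => intro n; simp [pvAddFrom, PySem.List.enumerate_nil]
  | cons l rest ih =>
    intro n
    by_cases h1 : PySem.Chars.startswith l.toList ['+','+','+',' ','b','/'] = true
    · have hng := pvB_plus3 l.toList h1
      simp_all [pvAddFrom, List.filter_cons]
    · by_cases h2 : (PySem.Chars.startswith l.toList ['+'] &&
          !(PySem.Chars.startswith l.toList ['+','+','+'])) = true <;>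
        simp_all [pvAddFrom, List.filter_cons, PySem.List.enumerate_cons]

-- A's removed-line numbering equals B's filter-then-enumerate pass
lemma pvRemFrom_eq (lines : List String) : ∀ n : Int,
    pvRemFrom n lines =
      (PySem.List.enumerate
        (lines.filter (fun l => PySem.Str.startswith l "-" && !(PySem.Str.startswith l "---"))) n).map
        (fun p => (p.1 + 1, PySem.Str.slice p.2 (some 1) none)) := by
  induction lines with
  | nil => intro n; simp [pvRemFrom, PySem.List.enumerate_nil]
  | cons l rest ih =>
    intro n
    by_cases h3 : (PySem.Chars.startswith l.toList ['-'] &&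
        !(PySem.Chars.startswith l.toList ['-','-','-'])) = true
    · have hminus : PySem.Chars.startswith l.toList ['-'] = true := by
        simp only [Bool.and_eq_true] at h3; exact h3.1
      have h1 : PySem.Chars.startswith l.toList ['+','+','+',' ','b','/'] = false := by
        rw [Bool.eq_false_iff]
        intro hb
        have := pv_plus_not_minus l.toList (pvB_plus l.toList hb)
        rw [hminus] at this
        exact absurd this (by simp)
      have h2 : PySem.Chars.startswith l.toList ['+'] = false := by
        rw [Bool.eq_false_iff]
        intro hp
        have := pv_plus_not_minus l.toList hp
        rw [hminus] at this
        exact absurd this (by simp)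
      simp_all [pvRemFrom, List.filter_cons, PySem.List.enumerate_cons]
    · by_cases h1 : PySem.Chars.startswith l.toList ['+','+','+',' ','b','/'] = true
      · simp_all [pvRemFrom, List.filter_cons]
      · by_cases h2 : (PySem.Chars.startswith l.toList ['+'] &&
            !(PySem.Chars.startswith l.toList ['+','+','+'])) = true <;>
          simp_all [pvRemFrom, List.filter_cons]

-- if no line matches '+++ b/', B's reversed scan yields ""
lemma pvLastBPath_none (xs : List String)
    (h : ∀ l ∈ xs, PySem.Str.startswith l "+++ b/" ≠ true) : pvLastBPath xs = "" := by
  induction xs with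
  | nil => rfl
  | cons x xs ih =>
    simp only [pvLastBPath]
    rw [if_neg (h x (by simp))]
    exact ih (fun l hl => h l (by simp [hl]))

-- ===== VERDICT (by name: the statement is the Claim_ definition above) =====
theorem parse_diff_chunk_py_spec : Claim_equal_parse_diff_chunk_py := by
  intro chunk _
  unfold Spec_parse_diff_chunk_py parse_diff_chunk_py parse_diff_chunk_py_alt
  rw [pvFoldA]
  simp only [List.length_nil, Nat.cast_zero, List.nil_append]
  refine Prod.ext ?_ (Prod.ext (pvAddFrom_eq _ 0) (pvRemFrom_eq _ 0))
  rw [pvLastPath_eq]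
  by_cases h : ∃ x ∈ (PySem.Str.split? chunk "\n").getD [],
      PySem.Chars.startswith x.toList ['+','+','+',' ','b','/'] = true
  · rw [if_pos (by simpa using h)]
  · rw [if_neg (by simpa using h)]
    rw [pvLastBPath_none]
    intro l hl hsw
    exact h ⟨l, List.mem_reverse.mp hl, by simpa using hsw⟩
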